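-- pv_equiv track=rewrite | github.com/Xander172006/chess-engine | moves.py | generate_king_moves
-- ===== SOURCE A (Python) =====
-- def generate_king_moves(king, occupied, enemy_pieces):
--     directions = [(-1, -1), (-1, 0), (-1, 1), (0, -1), (0, 1), (1, -1), (1, 0), (1, 1)]
--     legal_moves = 0
--     start_row, start_col = king
--
--     for direction in directions:
--         row_offset, col_offset = direction
--         current_row, current_col = start_row + row_offset, start_col + col_offset
--
--         if current_row < 0 or current_row >= 8 or current_col < 0 or current_col >= 8:
--             continue
--
--         piece = 1 << (current_row * 8 + current_col)
--         if not piece & occupied: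
--             legal_moves |= piece
--
--     return legal_moves
-- ===== SOURCE B (Python) =====
-- RANK_1 = 0xFF
-- FILE_A = 0x0101010101010101
--
--
-- def _rank_mask(i):
--     return RANK_1 << (8 * i) if 0 <= i < 8 else 0
--
--
-- def _file_mask(j):
--     return FILE_A << j if 0 <= j < 8 else 0
--
--
-- def generate_king_moves(king, occupied, enemy_pieces):
--     row, col = king
--     ranks = _rank_mask(row - 1) | _rank_mask(row) | _rank_mask(row + 1)
--     files = _file_mask(col - 1) | _file_mask(col) | _file_mask(col + 1)
--     attacks = ranks & files
--     if 0 <= row < 8 and 0 <= col < 8: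
--         attacks &= ~(1 << (row * 8 + col))
--     return attacks & ~occupied
-- ===== Notes on version B (the rewrite author's own statement) =====
-- stated objective: idiomatic
-- what changed: Replaces the direction-offset loop with per-square bounds checks by the idiomatic chess-engine bitboard computation: intersect three rank masks with three file masks to get the king's neighborhood box, clear the king's own bit, and AND once with ~occupied.
import Mathlib
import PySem

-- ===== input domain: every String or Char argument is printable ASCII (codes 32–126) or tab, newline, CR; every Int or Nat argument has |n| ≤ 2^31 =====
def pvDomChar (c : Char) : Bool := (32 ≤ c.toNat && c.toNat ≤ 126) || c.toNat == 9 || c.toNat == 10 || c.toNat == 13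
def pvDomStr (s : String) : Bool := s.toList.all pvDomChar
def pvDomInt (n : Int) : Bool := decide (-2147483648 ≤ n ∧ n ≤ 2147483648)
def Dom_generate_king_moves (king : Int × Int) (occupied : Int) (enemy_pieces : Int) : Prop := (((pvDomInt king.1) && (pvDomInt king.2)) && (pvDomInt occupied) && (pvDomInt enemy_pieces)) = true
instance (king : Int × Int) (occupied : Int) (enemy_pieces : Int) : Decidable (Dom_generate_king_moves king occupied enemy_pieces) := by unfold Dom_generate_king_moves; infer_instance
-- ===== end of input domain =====

-- B replaces A's direction loop with the idiomatic bitboard computation (rank-box ∧ file-box masks, one AND with ~occupied); same return value, no side effects.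

-- ===== PORT A =====
def generate_king_moves (king : Int × Int) (occupied : Int) (enemy_pieces : Int) : Int :=
  ([(-1,-1),(-1,0),(-1,1),(0,-1),(0,1),(1,-1),(1,0),(1,1)] : List (Int × Int)).foldl
    (fun legal_moves direction =>
      if king.1 + direction.1 < 0 ∨ 8 ≤ king.1 + direction.1 ∨
         king.2 + direction.2 < 0 ∨ 8 ≤ king.2 + direction.2 then
        legal_moves
      else
        if PySem.Int.band ((1 : Int) <<< ((king.1 + direction.1) * 8 + (king.2 + direction.2)).toNat) occupied = 0 then
          PySem.Int.bor legal_moves ((1 : Int) <<< ((king.1 + direction.1) * 8 + (king.2 + direction.2)).toNat)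
        else
          legal_moves) 0

-- ===== PORT B =====
def pvRankMask (i : Int) : Int := if 0 ≤ i ∧ i < 8 then (0xFF : Int) <<< (8 * i).toNat else 0

def pvFileMask (j : Int) : Int := if 0 ≤ j ∧ j < 8 then (0x0101010101010101 : Int) <<< j.toNat else 0

def generate_king_moves_alt (king : Int × Int) (occupied : Int) (enemy_pieces : Int) : Int :=
  let ranks := PySem.Int.bor (PySem.Int.bor (pvRankMask (king.1 - 1)) (pvRankMask king.1)) (pvRankMask (king.1 + 1))
  let files := PySem.Int.bor (PySem.Int.bor (pvFileMask (king.2 - 1)) (pvFileMask king.2)) (pvFileMask (king.2 + 1))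
  let attacks := PySem.Int.band ranks files
  let attacks :=
    if 0 ≤ king.1 ∧ king.1 < 8 ∧ 0 ≤ king.2 ∧ king.2 < 8 then
      PySem.Int.band attacks (Int.not ((1 : Int) <<< (king.1 * 8 + king.2).toNat))
    else attacks
  PySem.Int.band attacks (Int.not occupied)

-- ===== PRECONDITION & SPEC =====
def Spec_generate_king_moves (king : Int × Int) (occupied : Int) (enemy_pieces : Int) (out : Int) : Prop := out = generate_king_moves_alt king occupied enemy_pieces
instance (king : Int × Int) (occupied : Int) (enemy_pieces : Int) (out : Int) : Decidable (Spec_generate_king_moves king occupied enemy_pieces out) := by unfold Spec_generate_king_moves; infer_instance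

-- ===== CLAIM (what is proved, stated in full; the proofs are below) =====
def Claim_equal_generate_king_moves : Prop := ∀ (king : Int × Int) (occupied : Int) (enemy_pieces : Int), Dom_generate_king_moves king occupied enemy_pieces → Spec_generate_king_moves king occupied enemy_pieces (generate_king_moves king occupied enemy_pieces)

-- ===== LEMMAS AND PROOFS =====

-- If two naturals have no common bit, addition is bitwise or.
theorem pvDisjAdd : ∀ (a : Nat), ∀ b, a &&& b = 0 → a + b = a ||| b := by
  intro a
  induction a using Nat.binaryRec with
  | zero => intro b _; simp
  | bit xb x ih =>
    intro b
    induction b using Nat.binaryRec with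
    | zero => intro _; simp
    | bit yb y _ =>
      intro h
      rw [Nat.land_bit] at h
      rw [Nat.lor_bit]
      rw [Nat.bit_eq_zero_iff] at h
      have h2 := ih y h.1
      have hb := h.2
      cases xb <;> cases yb
      · simp [Nat.bit] <;> omega
      · simp [Nat.bit] <;> omega
      · simp [Nat.bit] <;> omega
      · exact absurd hb (by simp)

theorem pvSubAnd (m k : Nat) : m - (m &&& k) = Nat.ldiff m k := by
  have hd : Nat.ldiff m k &&& (m &&& k) = 0 := by
    apply Nat.eq_of_testBit_eq; intro j
    simp [Nat.testBit_ldiff, Nat.testBit_and]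
    cases m.testBit j <;> cases k.testBit j <;> simp
  have hs : Nat.ldiff m k ||| (m &&& k) = m := by
    apply Nat.eq_of_testBit_eq; intro j
    simp [Nat.testBit_ldiff, Nat.testBit_and, Nat.testBit_or]
    cases m.testBit j <;> cases k.testBit j <;> simp
  have := pvDisjAdd _ _ hd
  have hle : m &&& k ≤ m := Nat.and_le_left
  omega

-- Python & with a nonnegative left operand, expressed on Nat.
theorem pvBandCoe (m : Nat) (c : Int) :
    PySem.Int.band ↑m c = ↑(if 0 ≤ c then m &&& c.toNat else Nat.ldiff m (-c-1).toNat) := by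
  unfold PySem.Int.band
  rw [if_pos (by positivity : (0:Int) ≤ ↑m)]
  split_ifs with h
  · simp
  · simp [pvSubAnd]

theorem pvIntNot (n : Int) : Int.not n = -n - 1 := by
  rcases n with m|m <;> simp [Int.not, Int.negSucc_eq] <;> ring

-- Python m & ~c with m a nonnegative literal mask.
theorem pvBandCoeNot (m : Nat) (c : Int) :
    PySem.Int.band ↑m (Int.not c) = ↑(if 0 ≤ c then Nat.ldiff m c.toNat else m &&& (-c-1).toNat) := by
  rw [pvIntNot, pvBandCoe]
  rcases (by omega : 0 ≤ c ∨ c < 0) with h|h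
  · rw [if_neg (by omega), if_pos h]
    have harg : (-(-c-1)-1 : Int) = c := by ring
    rw [harg]
  · rw [if_pos (by omega), if_neg (by omega)]

theorem pvBorZeroLeft (b : Int) : PySem.Int.bor 0 b = b := by
  unfold PySem.Int.bor
  split_ifs <;> (try simp) <;> omega

theorem pvBandZeroLeft (c : Int) : PySem.Int.band 0 c = 0 := by
  unfold PySem.Int.band
  split_ifs <;> (try simp) <;> omega

theorem pvBandZeroRight (a : Int) : PySem.Int.band a 0 = 0 := by
  unfold PySem.Int.band
  split_ifs <;> (try simp) <;> omega

theorem pvOneShl (e : Nat) : ((1:Int) <<< e) = ((2^e : Nat) : Int) := by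
  simp [Int.shiftLeft_eq]

theorem pvPowAndZero (i n : Nat) : (2^i &&& n = 0) ↔ n.testBit i = false := by
  rw [Nat.two_pow_and]
  have h2 : 0 < 2^i := by positivity
  cases n.testBit i <;> simp <;> omega

theorem pvZeroLdiff (k : Nat) : Nat.ldiff 0 k = 0 := by
  apply Nat.eq_of_testBit_eq; intro j
  simp [Nat.testBit_ldiff]

theorem pvLdiffPowZero (i k : Nat) : (Nat.ldiff (2^i) k = 0) ↔ k.testBit i = true := by
  constructor
  · intro h
    have h2 := congrArg (fun x => Nat.testBit x i) h
    simp [Nat.testBit_ldiff, Nat.testBit_two_pow] at h2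
    exact h2
  · intro h
    apply Nat.eq_of_testBit_eq; intro j
    rcases eq_or_ne i j with rfl | hij
    · simp [Nat.testBit_ldiff, Nat.testBit_two_pow, h]
    · simp [Nat.testBit_ldiff, Nat.testBit_two_pow, hij]

-- A's loop body, as a fold over the list of on-board neighbor square indices.
def pvFoldA (occ : Int) (S : List Nat) (acc : Int) : Int :=
  S.foldl (fun (a : Int) (i : Nat) =>
    if PySem.Int.band ((1 : Int) <<< i) occ = 0 then PySem.Int.bor a ((1 : Int) <<< i) else a) acc

def pvMaskN (S : List Nat) : Nat := S.foldl (fun m i => m ||| 2^i) 0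

theorem pvFoldACons (occ : Int) (i : Nat) (S : List Nat) (a : Int) :
    pvFoldA occ (i :: S) a
      = pvFoldA occ S (if PySem.Int.band ((2^i : Nat) : Int) occ = 0 then PySem.Int.bor a ((2^i : Nat) : Int) else a) := by
  unfold pvFoldA
  rw [List.foldl_cons, pvOneShl]

theorem pvMaskFrom : ∀ (S : List Nat) (a : Nat), S.foldl (fun m i => m ||| 2^i) a = a ||| pvMaskN S := by
  intro S
  induction S with
  | nil => intro a; simp [pvMaskN]
  | cons j S ih =>
    intro a
    rw [List.foldl_cons, ih (a ||| 2^j)]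
    conv_rhs => rw [show pvMaskN (j :: S) = List.foldl (fun m i => m ||| 2^i) (0 ||| 2^j) S from rfl,
      ih (0 ||| 2^j)]
    rw [Nat.zero_or, Nat.lor_assoc]

theorem pvMaskCons (i : Nat) (S : List Nat) : pvMaskN (i :: S) = 2^i ||| pvMaskN S := by
  rw [show pvMaskN (i :: S) = List.foldl (fun m i => m ||| 2^i) (0 ||| 2^i) S from rfl,
    pvMaskFrom S (0 ||| 2^i), Nat.zero_or]

-- Master invariant: the conditional-OR fold equals box-mask AND NOT occupied.
theorem pvMaster (occ : Int) : ∀ (S : List Nat) (acc : Nat),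
    pvFoldA occ S (↑acc) = PySem.Int.bor ↑acc (PySem.Int.band ↑(pvMaskN S) (Int.not occ)) := by
  intro S
  induction S with
  | nil =>
    intro acc
    show (↑acc : Int) = PySem.Int.bor ↑acc (PySem.Int.band ↑(pvMaskN []) (Int.not occ))
    rw [show pvMaskN [] = 0 from rfl, pvBandCoeNot]
    split_ifs <;> simp [pvZeroLdiff, Nat.zero_and]
  | cons i S ih =>
    intro acc
    rw [pvFoldACons, pvMaskCons]
    by_cases hb : PySem.Int.band ((2^i : Nat) : Int) occ = 0
    · rw [if_pos hb, PySem.Int.bor_natCast, ih (acc ||| 2^i)]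
      rw [pvBandCoeNot, pvBandCoeNot]
      rcases (by omega : 0 ≤ occ ∨ occ < 0) with hc | hc
      · simp only [if_pos hc]
        have hn : occ.toNat.testBit i = false := by
          rw [pvBandCoe, if_pos hc] at hb
          exact (pvPowAndZero i occ.toNat).mp (by exact_mod_cast hb)
        rw [PySem.Int.bor_natCast, PySem.Int.bor_natCast]
        congr 1
        apply Nat.eq_of_testBit_eq; intro j
        rcases eq_or_ne i j with rfl | hij
        · simp [Nat.testBit_or, Nat.testBit_ldiff, Nat.testBit_two_pow, hn]
        · simp only [Nat.testBit_or, Nat.testBit_ldiff, Nat.testBit_two_pow]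
          cases acc.testBit j <;> cases (pvMaskN S).testBit j <;> cases occ.toNat.testBit j <;> simp [hij]
      · simp only [if_neg (by omega : ¬ (0:Int) ≤ occ)]
        have hk : (-occ-1).toNat.testBit i = true := by
          rw [pvBandCoe, if_neg (by omega)] at hb
          exact (pvLdiffPowZero i (-occ-1).toNat).mp (by exact_mod_cast hb)
        rw [(by omega : ((-occ-1 : Int)).toNat = (-occ).toNat - 1)] at hk
        rw [PySem.Int.bor_natCast, PySem.Int.bor_natCast]
        congr 1
        apply Nat.eq_of_testBit_eq; intro j
        rcases eq_or_ne i j with rfl | hij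
        · simp [Nat.testBit_or, Nat.testBit_and, Nat.testBit_two_pow, hk]
        · simp only [Nat.testBit_or, Nat.testBit_and, Nat.testBit_two_pow]
          cases acc.testBit j <;> cases (pvMaskN S).testBit j <;> cases (-occ-1).toNat.testBit j <;> simp [hij]
    · rw [if_neg hb, ih acc]
      rw [pvBandCoeNot, pvBandCoeNot]
      rcases (by omega : 0 ≤ occ ∨ occ < 0) with hc | hc
      · simp only [if_pos hc]
        have hn : occ.toNat.testBit i = true := by
          rw [pvBandCoe, if_pos hc] at hb
          cases h2 : occ.toNat.testBit i
          · exfalso; apply hb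
            rw [(pvPowAndZero i occ.toNat).mpr h2]; simp
          · rfl
        congr 1
        rw [Nat.cast_inj]
        apply Nat.eq_of_testBit_eq; intro j
        rcases eq_or_ne i j with rfl | hij
        · simp [Nat.testBit_or, Nat.testBit_ldiff, Nat.testBit_two_pow, hn]
        · simp [Nat.testBit_or, Nat.testBit_ldiff, Nat.testBit_two_pow, hij]
      · simp only [if_neg (by omega : ¬ (0:Int) ≤ occ)]
        have hk : (-occ-1).toNat.testBit i = false := by
          rw [pvBandCoe, if_neg (by omega)] at hb
          cases h2 : (-occ-1).toNat.testBit i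
          · rfl
          · exfalso; apply hb
            rw [(pvLdiffPowZero i (-occ-1).toNat).mpr h2]; simp
        rw [(by omega : ((-occ-1 : Int)).toNat = (-occ).toNat - 1)] at hk
        congr 1
        rw [Nat.cast_inj]
        apply Nat.eq_of_testBit_eq; intro j
        rcases eq_or_ne i j with rfl | hij
        · simp [Nat.testBit_or, Nat.testBit_and, Nat.testBit_two_pow, hk]
        · simp [Nat.testBit_or, Nat.testBit_and, Nat.testBit_two_pow, hij]

theorem pvMasterZero (occ : Int) (S : List Nat) :
    pvFoldA occ S 0 = PySem.Int.band ↑(pvMaskN S) (Int.not occ) := by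
  have h := pvMaster occ S 0
  rw [Nat.cast_zero] at h
  rw [h, pvBorZeroLeft]

-- The on-board neighbor squares visited by A, in A's order.
def pvNeighbors (r c : Int) : List Nat :=
  ([(-1,-1),(-1,0),(-1,1),(0,-1),(0,1),(1,-1),(1,0),(1,1)] : List (Int × Int)).filterMap
    (fun d => if r + d.1 < 0 ∨ 8 ≤ r + d.1 ∨ c + d.2 < 0 ∨ 8 ≤ c + d.2 then none
              else some ((r + d.1) * 8 + (c + d.2)).toNat)

theorem pvFoldGuard (r c occ : Int) : ∀ (ds : List (Int × Int)) (acc : Int),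
    (ds.foldl (fun legal_moves direction =>
      if r + direction.1 < 0 ∨ 8 ≤ r + direction.1 ∨
         c + direction.2 < 0 ∨ 8 ≤ c + direction.2 then
        legal_moves
      else
        if PySem.Int.band ((1 : Int) <<< ((r + direction.1) * 8 + (c + direction.2)).toNat) occ = 0 then
          PySem.Int.bor legal_moves ((1 : Int) <<< ((r + direction.1) * 8 + (c + direction.2)).toNat)
        else
          legal_moves) acc)
    = pvFoldA occ (ds.filterMap
        (fun d => if r + d.1 < 0 ∨ 8 ≤ r + d.1 ∨ c + d.2 < 0 ∨ 8 ≤ c + d.2 then none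
                  else some ((r + d.1) * 8 + (c + d.2)).toNat)) acc := by
  intro ds
  induction ds with
  | nil => intro acc; rfl
  | cons d ds ih =>
    intro acc
    by_cases hg : r + d.1 < 0 ∨ 8 ≤ r + d.1 ∨ c + d.2 < 0 ∨ 8 ≤ c + d.2
    · rw [List.foldl_cons, List.filterMap_cons, if_pos hg, if_pos hg]
      exact ih acc
    · rw [List.foldl_cons, List.filterMap_cons, if_neg hg, if_neg hg]
      rw [ih]
      rfl

theorem pvAEq (king : Int × Int) (occ ep : Int) :
    generate_king_moves king occ ep
      = PySem.Int.band ↑(pvMaskN (pvNeighbors king.1 king.2)) (Int.not occ) := by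
  unfold generate_king_moves
  rw [pvFoldGuard king.1 king.2 occ]
  rw [pvMasterZero]
  rfl

-- The occupancy-independent part of B.
def pvBox (row col : Int) : Int :=
  if 0 ≤ row ∧ row < 8 ∧ 0 ≤ col ∧ col < 8 then
    PySem.Int.band
      (PySem.Int.band
        (PySem.Int.bor (PySem.Int.bor (pvRankMask (row - 1)) (pvRankMask row)) (pvRankMask (row + 1)))
        (PySem.Int.bor (PySem.Int.bor (pvFileMask (col - 1)) (pvFileMask col)) (pvFileMask (col + 1))))
      (Int.not ((1 : Int) <<< (row * 8 + col).toNat))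
  else
    PySem.Int.band
      (PySem.Int.bor (PySem.Int.bor (pvRankMask (row - 1)) (pvRankMask row)) (pvRankMask (row + 1)))
      (PySem.Int.bor (PySem.Int.bor (pvFileMask (col - 1)) (pvFileMask col)) (pvFileMask (col + 1)))

theorem pvAltEq (king : Int × Int) (occ ep : Int) :
    generate_king_moves_alt king occ ep = PySem.Int.band (pvBox king.1 king.2) (Int.not occ) := rfl

theorem pvRankZero (i : Int) (h : i < 0 ∨ 8 ≤ i) : pvRankMask i = 0 := by
  unfold pvRankMask; rw [if_neg (by omega)]

theorem pvFileZero (j : Int) (h : j < 0 ∨ 8 ≤ j) : pvFileMask j = 0 := by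
  unfold pvFileMask; rw [if_neg (by omega)]

theorem pvNeighborsNil (r c : Int) (h : r ≤ -2 ∨ 9 ≤ r ∨ c ≤ -2 ∨ 9 ≤ c) :
    pvNeighbors r c = [] := by
  rw [pvNeighbors, List.filterMap_eq_nil_iff]
  intro d hd
  fin_cases hd <;> rw [if_pos (by omega)]

theorem pvBoxEq (r c : Int) : pvBox r c = ↑(pvMaskN (pvNeighbors r c)) := by
  by_cases h1 : -1 ≤ r ∧ r ≤ 8 ∧ -1 ≤ c ∧ c ≤ 8
  · obtain ⟨ha, hb, hc, hd⟩ := h1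
    interval_cases r <;> interval_cases c <;> decide
  · have hout : r ≤ -2 ∨ 9 ≤ r ∨ c ≤ -2 ∨ 9 ≤ c := by omega
    rw [pvNeighborsNil r c hout]
    rw [show pvMaskN [] = 0 from rfl]
    unfold pvBox
    rw [if_neg (by omega)]
    rcases hout with h | h | h | h
    · rw [pvRankZero _ (by omega), pvRankZero _ (by omega), pvRankZero _ (by omega)]
      rw [show PySem.Int.bor (PySem.Int.bor 0 0) 0 = 0 from by decide]
      rw [pvBandZeroLeft]; rfl
    · rw [pvRankZero _ (by omega), pvRankZero _ (by omega), pvRankZero _ (by omega)]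
      rw [show PySem.Int.bor (PySem.Int.bor 0 0) 0 = 0 from by decide]
      rw [pvBandZeroLeft]; rfl
    · rw [pvFileZero _ (by omega), pvFileZero _ (by omega), pvFileZero _ (by omega)]
      rw [show PySem.Int.bor (PySem.Int.bor 0 0) 0 = 0 from by decide]
      rw [pvBandZeroRight]; rfl
    · rw [pvFileZero _ (by omega), pvFileZero _ (by omega), pvFileZero _ (by omega)]
      rw [show PySem.Int.bor (PySem.Int.bor 0 0) 0 = 0 from by decide]
      rw [pvBandZeroRight]; rfl

-- ===== VERDICT (by name: the statement is the Claim_ definition above) =====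
theorem generate_king_moves_spec : Claim_equal_generate_king_moves := by
  intro king occ ep _
  show generate_king_moves king occ ep = generate_king_moves_alt king occ ep
  rw [pvAEq, pvAltEq, pvBoxEq]
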